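-- pv_equiv track=rewrite | github.com/mateuszwroobel/DSA | egzaminy/egzaminy_poprzednie/asd_egz_2324/2/A/egz2a.py | wired
-- ===== SOURCE A (Python) =====
-- from math import inf
--
-- def wired(T):
--     n = len(T)
--     F = [[inf for _ in range(n)]for _ in range(n)]
--     def wire(i,j,T):
--         if i >= j: return 0
--         if F[i][j] != inf: return F[i][j]
--         #nielaczymy kabelkow i,j
--         option2 = min((wire(i,k,T) + wire(k+1,j,T) for k in range(i+1,j,2)),
--                    default=inf)
--         #laczymy kabelki i,j
--         option1 = abs(T[i] - T[j]) + 1  + wire(i+1,j-1,T)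
--         F[i][j] = min(option1,option2)
--         return F[i][j]
--
--     return wire(0,n-1,T)
-- ===== SOURCE B (Python) =====
-- def wired(T):
--     n = len(T)
--     if n <= 1:
--         return 0
--     f = {}
--     for L in range(1, n):
--         for i in range(0, n - L):
--             j = i + L
--             best = abs(T[i] - T[j]) + 1 + f.get((i + 1, j - 1), 0)
--             for k in range(i + 1, j, 2):
--                 c = f.get((i, k), 0) + f.get((k + 1, j), 0)
--                 if c < best:
--                     best = c
--             f[(i, j)] = best
--     return f[(0, n - 1)]
-- ===== Notes on version B (the rewrite author's own statement) =====
-- stated objective: alternative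
-- what changed: Replaced A's memoized top-down recursion (closure over an inf-initialised n×n table) by a bottom-up iterative interval DP that fills a dictionary of interval costs by increasing interval length, with no recursion and no inf sentinel.
import Mathlib
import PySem

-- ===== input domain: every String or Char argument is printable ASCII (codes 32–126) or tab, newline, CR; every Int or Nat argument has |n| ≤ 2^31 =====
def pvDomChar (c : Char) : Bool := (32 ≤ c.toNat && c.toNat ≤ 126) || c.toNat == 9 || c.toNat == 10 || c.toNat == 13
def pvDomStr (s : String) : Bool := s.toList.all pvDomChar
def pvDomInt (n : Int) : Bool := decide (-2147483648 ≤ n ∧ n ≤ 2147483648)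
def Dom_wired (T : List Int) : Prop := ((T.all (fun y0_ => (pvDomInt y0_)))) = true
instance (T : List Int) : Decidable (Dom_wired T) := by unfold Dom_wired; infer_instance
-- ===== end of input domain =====

-- B replaces A's memoized top-down recursion by a bottom-up iterative interval DP over a
-- dictionary keyed by (i, j), filled by increasing interval length (objective: alternative).

-- ===== PORT A =====
-- A's memo table F (n×n, inf-initialised) is ported as a threaded dictionary: a key absent
-- from the dictionary is exactly an entry still equal to inf.  The inner generator of
-- `min(..., default=inf)` is the recursion `pvLoopA` over the ks of range(i+1, j, 2)
-- (attached with their membership proofs, needed only for termination); its Option result is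
-- `none` exactly when Python's min falls back to inf.
mutual
def pvWireA (T : List Int) (i j : Int) (F : PySem.Dict (Int × Int) Int) :
    Int × PySem.Dict (Int × Int) Int :=
  if i ≥ j then (0, F)
  else
    match F.get? (i, j) with
    | some v => (v, F)
    | none =>
      let r2 := pvLoopA T i j ((PySem.List.pyRange (i + 1) j 2).attach) F
      let r1 := pvWireA T (i + 1) (j - 1) r2.2
      let o1 := |PySem.List.pyGetD T i 0 - PySem.List.pyGetD T j 0| + 1 + r1.1
      let res := match r2.1 with
        | none => o1
        | some m => min o1 m
      (res, (r1.2).insert (i, j) res)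
termination_by ((j - i).toNat, 1, 0)
decreasing_by
  · exact Prod.Lex.right _ (Prod.Lex.left _ _ (by omega))
  · simp only [not_le] at *; exact Prod.Lex.left _ _ (by omega)

def pvLoopA (T : List Int) (i j : Int)
    (ks : List {x : Int // x ∈ PySem.List.pyRange (i + 1) j 2})
    (F : PySem.Dict (Int × Int) Int) :
    Option Int × PySem.Dict (Int × Int) Int :=
  match ks with
  | [] => (none, F)
  | ⟨k, hk⟩ :: rest =>
    let ra := pvWireA T i k F
    let rb := pvWireA T (k + 1) j ra.2
    let c := ra.1 + rb.1
    let rr := pvLoopA T i j rest rb.2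
    (some (match rr.1 with | none => c | some m => min c m), rr.2)
termination_by ((j - i).toNat, 0, ks.length)
decreasing_by
  · have h := ((PySem.List.mem_pyRange_iff_of_pos (by norm_num : (0:Int) < 2) k).1 hk)
    exact Prod.Lex.left _ _ (by omega)
  · have h := ((PySem.List.mem_pyRange_iff_of_pos (by norm_num : (0:Int) < 2) k).1 hk)
    exact Prod.Lex.left _ _ (by omega)
  · exact Prod.Lex.right _ (Prod.Lex.right _ (by simp))
end

def wired (T : List Int) : Int :=
  let n := (T.length : Int)
  (pvWireA T 0 (n - 1) PySem.Dict.empty).1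

-- ===== PORT B =====
-- bottom-up DP (Source B): pvBestB is the body computing f[(i, j)], pvRowB the inner i-loop body,
-- pvLenB the body of the outer loop over lengths L.
def pvBestB (T : List Int) (f : PySem.Dict (Int × Int) Int) (i j : Int) : Int :=
  let best := |PySem.List.pyGetD T i 0 - PySem.List.pyGetD T j 0| + 1 + f.getD (i + 1, j - 1) 0
  (PySem.List.pyRange (i + 1) j 2).foldl (fun best k =>
    let c := f.getD (i, k) 0 + f.getD (k + 1, j) 0
    if c < best then c else best) best

def pvRowB (T : List Int) (L : Int) (f : PySem.Dict (Int × Int) Int) (i : Int) :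
    PySem.Dict (Int × Int) Int :=
  f.insert (i, i + L) (pvBestB T f i (i + L))

def pvLenB (T : List Int) (n : Int) (f : PySem.Dict (Int × Int) Int) (L : Int) :
    PySem.Dict (Int × Int) Int :=
  (PySem.List.pyRange 0 (n - L) 1).foldl (pvRowB T L) f

def wired_alt (T : List Int) : Int :=
  let n := (T.length : Int)
  if n ≤ 1 then 0
  else
    let f := (PySem.List.pyRange 1 n 1).foldl (pvLenB T n) PySem.Dict.empty
    f.getD (0, n - 1) 0

-- ===== PRECONDITION & SPEC =====
def Spec_wired (T : List Int) (out : Int) : Prop := out = wired_alt T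
instance (T : List Int) (out : Int) : Decidable (Spec_wired T out) := by unfold Spec_wired; infer_instance

-- ===== CLAIM (what is proved, stated in full; the proofs are below) =====
def Claim_equal_wired : Prop := ∀ (T : List Int), Dom_wired T → Spec_wired T (wired T)

-- ===== LEMMAS AND PROOFS =====

-- the common mathematical value: the same recursion without the memo table
mutual
def pvG (T : List Int) (i j : Int) : Int :=
  if i ≥ j then 0
  else
    let o2 := pvGL T i j ((PySem.List.pyRange (i + 1) j 2).attach)
    let o1 := |PySem.List.pyGetD T i 0 - PySem.List.pyGetD T j 0| + 1 + pvG T (i + 1) (j - 1)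
    match o2 with
    | none => o1
    | some m => min o1 m
termination_by ((j - i).toNat, 1, 0)
decreasing_by
  · exact Prod.Lex.right _ (Prod.Lex.left _ _ (by omega))
  · simp only [not_le] at *; exact Prod.Lex.left _ _ (by omega)

def pvGL (T : List Int) (i j : Int)
    (ks : List {x : Int // x ∈ PySem.List.pyRange (i + 1) j 2}) : Option Int :=
  match ks with
  | [] => none
  | ⟨k, hk⟩ :: rest =>
    let c := pvG T i k + pvG T (k + 1) j
    some (match pvGL T i j rest with | none => c | some m => min c m)
termination_by ((j - i).toNat, 0, ks.length)
decreasing_by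
  · have h := ((PySem.List.mem_pyRange_iff_of_pos (by norm_num : (0:Int) < 2) k).1 hk)
    exact Prod.Lex.left _ _ (by omega)
  · have h := ((PySem.List.mem_pyRange_iff_of_pos (by norm_num : (0:Int) < 2) k).1 hk)
    exact Prod.Lex.left _ _ (by omega)
  · exact Prod.Lex.right _ (Prod.Lex.right _ (by simp))
end

lemma pvG_of_ge {T : List Int} {i j : Int} (h : j ≤ i) : pvG T i j = 0 := by
  rw [pvG]; simp [h]

-- the memo soundness invariant for A's table
def pvInv (T : List Int) (F : PySem.Dict (Int × Int) Int) : Prop :=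
  ∀ a b v : Int, F.get? (a, b) = some v → v = pvG T a b

lemma pvInv_empty (T : List Int) : pvInv T PySem.Dict.empty := by
  intro a b v h
  simp [PySem.Dict.get?_empty] at h

lemma pvInv_insert {T : List Int} {F : PySem.Dict (Int × Int) Int} (h : pvInv T F)
    (a b : Int) : pvInv T (F.insert (a, b) (pvG T a b)) := by
  intro a' b' v hv
  rw [PySem.Dict.get?_insert] at hv
  split at hv
  · rename_i heq
    cases Prod.mk.injEq .. ▸ heq
    · simp at heq
      obtain ⟨h1, h2⟩ := heq
      subst h1; subst h2
      exact (Option.some.injEq .. ▸ hv).symm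
  · exact h a' b' v hv

-- A's memoized recursion computes pvG and keeps the invariant
lemma pvWireA_correct : ∀ (N : Nat) (i j : Int) (T : List Int)
    (F : PySem.Dict (Int × Int) Int), (j - i).toNat < N → pvInv T F →
    (pvWireA T i j F).1 = pvG T i j ∧ pvInv T (pvWireA T i j F).2 := by
  intro N
  induction N with
  | zero => intro i j T F h; omega
  | succ N ih =>
    intro i j T F hN hF
    by_cases hij : i ≥ j
    · rw [pvWireA, pvG]
      simp [hij, hF]
    · rw [ge_iff_le, not_le] at hij
      have hloop : ∀ (ks : List {x : Int // x ∈ PySem.List.pyRange (i + 1) j 2})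
          (F : PySem.Dict (Int × Int) Int), pvInv T F →
          (pvLoopA T i j ks F).1 = pvGL T i j ks ∧ pvInv T (pvLoopA T i j ks F).2 := by
        intro ks
        induction ks with
        | nil => intro F hF; rw [pvLoopA, pvGL]; exact ⟨rfl, hF⟩
        | cons hd rest ihks =>
          obtain ⟨k, hk⟩ := hd
          intro F hF
          have hb := (PySem.List.mem_pyRange_iff_of_pos (by norm_num : (0:Int) < 2) k).1 hk
          have h1 := ih i k T F (by omega) hF
          have h2 := ih (k + 1) j T _ (by omega) h1.2
          have h3 := ihks _ h2.2
          rw [pvLoopA, pvGL]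
          simp only []
          rw [h1.1, h2.1, h3.1]
          exact ⟨rfl, h3.2⟩
      rcases hget : F.get? (i, j) with _ | v
      · have h2 := hloop ((PySem.List.pyRange (i + 1) j 2).attach) F hF
        have h1 := ih (i + 1) (j - 1) T _ (by omega) h2.2
        rw [pvWireA]
        rw [hget]
        simp only [ge_iff_le, not_le.mpr hij, if_false]
        rw [h2.1, h1.1]
        constructor
        · conv_rhs => rw [pvG]
          simp only [ge_iff_le, not_le.mpr hij, if_false]
        · have hres : (match pvGL T i j (PySem.List.pyRange (i + 1) j 2).attach with
              | none => |PySem.List.pyGetD T i 0 - PySem.List.pyGetD T j 0| + 1 + pvG T (i + 1) (j - 1)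
              | some m => min (|PySem.List.pyGetD T i 0 - PySem.List.pyGetD T j 0| + 1 + pvG T (i + 1) (j - 1)) m)
              = pvG T i j := by
            conv_rhs => rw [pvG]
            simp only [ge_iff_le, not_le.mpr hij, if_false]
          rw [hres]
          exact pvInv_insert h1.2 i j
      · rw [pvWireA, hget]
        simp only [ge_iff_le, not_le.mpr hij, if_false]
        exact ⟨hF i j v hget, hF⟩

lemma wired_eq_pvG (T : List Int) : wired T = pvG T 0 ((T.length : Int) - 1) := by
  have h := pvWireA_correct (((T.length : Int) - 1 - 0).toNat + 1) 0 ((T.length : Int) - 1)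
    T PySem.Dict.empty (by omega) (pvInv_empty T)
  simpa [wired] using h.1

-- B's table invariant: after the lengths < L are done and, inside length L, the rows < i0,
-- the dictionary holds exactly the pvG values of those intervals
def pvTab (T : List Int) (n L i0 : Int) (f : PySem.Dict (Int × Int) Int) : Prop :=
  ∀ a b : Int, f.get? (a, b) =
    if 0 ≤ a ∧ b < n ∧ 1 ≤ b - a ∧ (b - a < L ∨ (b - a = L ∧ a < i0)) then some (pvG T a b)
    else none

lemma pvFold_min {T : List Int} (f : PySem.Dict (Int × Int) Int) {i j : Int}
    (hc : ∀ k, k ∈ PySem.List.pyRange (i + 1) j 2 →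
      f.getD (i, k) 0 + f.getD (k + 1, j) 0 = pvG T i k + pvG T (k + 1) j) :
    ∀ (ks : List {x : Int // x ∈ PySem.List.pyRange (i + 1) j 2}) (b0 : Int),
    (ks.map Subtype.val).foldl (fun best k =>
      let c := f.getD (i, k) 0 + f.getD (k + 1, j) 0
      if c < best then c else best) b0
      = match pvGL T i j ks with | none => b0 | some m => min b0 m := by
  intro ks
  induction ks with
  | nil => intro b0; rw [pvGL]; rfl
  | cons hd rest ihks =>
    obtain ⟨k, hk⟩ := hd
    intro b0
    rw [List.map_cons, List.foldl_cons, pvGL]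
    simp only []
    rw [ihks, hc k hk]
    have hmin : (if pvG T i k + pvG T (k + 1) j < b0 then pvG T i k + pvG T (k + 1) j else b0)
        = min b0 (pvG T i k + pvG T (k + 1) j) := by
      rw [min_def]; split <;> split <;> omega
    rw [hmin]
    rcases pvGL T i j rest with _ | m
    · rfl
    · simp only []
      rw [min_assoc]

lemma pvBestB_eq {T : List Int} {n L i0 : Int} {f : PySem.Dict (Int × Int) Int}
    (h : pvTab T n L i0 f) (hL : 1 ≤ L) (hi : 0 ≤ i0) (hin : i0 + L < n) :
    pvBestB T f i0 (i0 + L) = pvG T i0 (i0 + L) := by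
  have hget : ∀ a b : Int, 0 ≤ a → b < n → b - a < L ∨ (b - a = L ∧ a < i0) →
      f.getD (a, b) 0 = pvG T a b := by
    intro a b ha hb hcond
    rw [PySem.Dict.getD_eq_get?_getD, h a b]
    by_cases h1 : 1 ≤ b - a
    · rw [if_pos ⟨ha, hb, h1, hcond⟩]; rfl
    · rw [if_neg (fun hc => h1 hc.2.2.1), pvG_of_ge (by omega)]; rfl
  have hbase : f.getD (i0 + 1, i0 + L - 1) 0 = pvG T (i0 + 1) (i0 + L - 1) :=
    hget _ _ (by omega) (by omega) (by omega)
  have hc : ∀ k, k ∈ PySem.List.pyRange (i0 + 1) (i0 + L) 2 →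
      f.getD (i0, k) 0 + f.getD (k + 1, i0 + L) 0 = pvG T i0 k + pvG T (k + 1) (i0 + L) := by
    intro k hk
    have hb := (PySem.List.mem_pyRange_iff_of_pos (by norm_num : (0:Int) < 2) k).1 hk
    rw [hget i0 k (by omega) (by omega) (by omega),
      hget (k + 1) (i0 + L) (by omega) (by omega) (by omega)]
  unfold pvBestB
  rw [hbase]
  rw [← List.attach_map_subtype_val (PySem.List.pyRange (i0 + 1) (i0 + L) 2),
    pvFold_min f hc]
  conv_rhs => rw [pvG]
  rw [if_neg (by omega)]

lemma pvTab_step {T : List Int} {n L i0 : Int} {f : PySem.Dict (Int × Int) Int}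
    (h : pvTab T n L i0 f) (hL : 1 ≤ L) (hi : 0 ≤ i0) (hin : i0 + L < n) :
    pvTab T n L (i0 + 1) (pvRowB T L f i0) := by
  intro a b
  unfold pvRowB
  rw [pvBestB_eq h hL hi hin, PySem.Dict.get?_insert]
  split
  · rename_i heq
    have hab : a = i0 ∧ b = i0 + L := by
      constructor
      · exact congrArg Prod.fst heq
      · exact congrArg Prod.snd heq
    obtain ⟨ha, hb⟩ := hab
    subst ha; subst hb
    rw [if_pos (by omega)]
  · rename_i hne
    have hne' : ¬(a = i0 ∧ b = i0 + L) := by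
      rintro ⟨x, y⟩; exact hne (by rw [x, y])
    rw [h a b]
    refine if_congr ?_ rfl rfl
    constructor <;> intro hc <;>
      refine ⟨hc.1, hc.2.1, hc.2.2.1, ?_⟩ <;> omega

lemma pvTab_row {T : List Int} {n L : Int} (hL : 1 ≤ L) :
    ∀ (m : Nat) (i0 : Int) (f : PySem.Dict (Int × Int) Int), (n - L - i0).toNat = m →
    0 ≤ i0 → i0 ≤ n - L → pvTab T n L i0 f →
    pvTab T n L (n - L) ((PySem.List.pyRange i0 (n - L) 1).foldl (pvRowB T L) f) := by
  intro m
  induction m with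
  | zero =>
    intro i0 f hm hi hile h
    have : i0 = n - L := by omega
    subst this
    rw [PySem.List.pyRange_one_eq_nil le_rfl, List.foldl_nil]
    exact h
  | succ m ihm =>
    intro i0 f hm hi hile h
    have hlt : i0 < n - L := by omega
    rw [PySem.List.pyRange_one_cons hlt, List.foldl_cons]
    exact ihm (i0 + 1) _ (by omega) (by omega) (by omega)
      (pvTab_step h hL hi (by omega))

lemma pvTab_shift {T : List Int} {n L : Int} {f : PySem.Dict (Int × Int) Int}
    (h : pvTab T n L (n - L) f) : pvTab T n (L + 1) 0 f := by
  intro a b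
  rw [h a b]
  refine if_congr ?_ rfl rfl
  omega

lemma pvTab_outer {T : List Int} {n : Int} :
    ∀ (m : Nat) (L : Int) (f : PySem.Dict (Int × Int) Int), (n - L).toNat = m →
    1 ≤ L → L ≤ n → pvTab T n L 0 f →
    pvTab T n n 0 ((PySem.List.pyRange L n 1).foldl (pvLenB T n) f) := by
  intro m
  induction m with
  | zero =>
    intro L f hm hL hLn h
    have : L = n := by omega
    subst this
    rw [PySem.List.pyRange_one_eq_nil le_rfl, List.foldl_nil]
    exact h
  | succ m ihm =>
    intro L f hm hL hLn h
    have hlt : L < n := by omega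
    rw [PySem.List.pyRange_one_cons hlt, List.foldl_cons]
    refine ihm (L + 1) _ (by omega) (by omega) (by omega) ?_
    exact pvTab_shift (pvTab_row hL (n - L - 0).toNat 0 f rfl le_rfl (by omega) h)

lemma wired_alt_eq_pvG (T : List Int) : wired_alt T = pvG T 0 ((T.length : Int) - 1) := by
  unfold wired_alt
  simp only []
  split
  · rename_i hle
    rw [pvG_of_ge (by omega)]
  · rename_i hgt
    have h0 : pvTab T (T.length : Int) 1 0 PySem.Dict.empty := by
      intro a b
      rw [PySem.Dict.get?_empty, if_neg (by omega)]
    have hf := pvTab_outer ((T.length : Int) - 1).toNat 1 PySem.Dict.empty rfl le_rfl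
      (by omega) h0
    rw [PySem.Dict.getD_eq_get?_getD, hf 0 ((T.length : Int) - 1), if_pos (by omega)]
    rfl

-- ===== VERDICT (by name: the statement is the Claim_ definition above) =====
theorem wired_spec : Claim_equal_wired := by
  intro T _
  unfold Spec_wired
  rw [wired_eq_pvG, wired_alt_eq_pvG]
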